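-- pv_equiv track=rewrite | github.com/ezw678/CodingBat | Python/logic_2.py | lone_sum_2
-- ===== SOURCE A (Python) =====
-- def lone_sum_2(a, b, c):
--   ol = [a, b, c]
--   nl = []
--   dl = []
--
--   for n in ol:
--     if not n in nl:
--       nl.append(n)
--     else:
--       dl.append(n)
--
--   fl = list(set(ol)-set(dl))      #nice. exactly i want to figure out
--
--   return sum(fl)
-- ===== SOURCE B (Python) =====
-- def lone_sum_2(a, b, c):
--     # Closed-form case analysis: return the sum of the values not shared.
--     if a == b:
--         return 0 if b == c else c
--     if a == c:
--         return b
--     if b == c: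
--         return a
--     return a + b + c
-- ===== Notes on version B (the rewrite author's own statement) =====
-- stated objective: simpler
-- what changed: Replaced A's seen/duplicate list building and set-difference with a direct closed-form branch on the pairwise equalities.
import Mathlib
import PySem

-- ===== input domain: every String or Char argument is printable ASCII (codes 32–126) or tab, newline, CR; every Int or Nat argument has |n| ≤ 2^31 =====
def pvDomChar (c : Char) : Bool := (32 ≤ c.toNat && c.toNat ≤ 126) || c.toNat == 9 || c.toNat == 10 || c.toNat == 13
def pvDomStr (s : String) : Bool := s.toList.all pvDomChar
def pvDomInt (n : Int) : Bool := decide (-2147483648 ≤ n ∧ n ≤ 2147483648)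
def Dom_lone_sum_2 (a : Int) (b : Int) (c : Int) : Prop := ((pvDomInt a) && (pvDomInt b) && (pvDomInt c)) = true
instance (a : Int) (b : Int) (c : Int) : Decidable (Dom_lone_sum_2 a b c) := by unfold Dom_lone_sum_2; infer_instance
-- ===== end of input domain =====

-- B replaces A's seen/duplicate lists and set-difference with a direct case analysis (simpler).

-- ===== PORT A =====
def lone_sum_2 (a : Int) (b : Int) (c : Int) : Int :=
  let ol : List Int := [a, b, c]
  -- for n in ol: append to nl if unseen, else to dl
  let p : List Int × List Int :=
    ol.foldl (fun (st : List Int × List Int) n =>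
      if ¬ st.1.contains n then (st.1 ++ [n], st.2) else (st.1, st.2 ++ [n])) ([], [])
  let fl : List Int := PySem.Set.diff (PySem.Set.ofList ol) (PySem.Set.ofList p.2)
  fl.sum

-- ===== PORT B =====
def lone_sum_2_alt (a : Int) (b : Int) (c : Int) : Int :=
  if a = b then (if b = c then 0 else c)
  else if a = c then b
  else if b = c then a
  else a + b + c

-- ===== PRECONDITION & SPEC =====
def Spec_lone_sum_2 (a : Int) (b : Int) (c : Int) (out : Int) : Prop := out = lone_sum_2_alt a b c
instance (a : Int) (b : Int) (c : Int) (out : Int) : Decidable (Spec_lone_sum_2 a b c out) := by unfold Spec_lone_sum_2; infer_instance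

-- ===== CLAIM (what is proved, stated in full; the proofs are below) =====
def Claim_equal_lone_sum_2 : Prop := ∀ (a : Int) (b : Int) (c : Int), Dom_lone_sum_2 a b c → Spec_lone_sum_2 a b c (lone_sum_2 a b c)

-- ===== LEMMAS AND PROOFS =====

-- ===== VERDICT (by name: the statement is the Claim_ definition above) =====
theorem lone_sum_2_spec : Claim_equal_lone_sum_2 := by
  intro a b c _
  unfold Spec_lone_sum_2 lone_sum_2 lone_sum_2_alt
  by_cases hab : a = b <;> by_cases hac : a = c <;> by_cases hbc : b = c <;>
    simp only [List.foldl, List.contains, List.elem, PySem.Set.ofList, PySem.Set.add,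
      PySem.Set.diff, PySem.Set.contains, hab, hac, hbc] <;>
    simp [eq_comm, hab, hac, hbc] <;> omega
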